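-- pv_equiv track=rewrite | github.com/Dorzhi-code/DB_music | SimpleTree/Enumeration_of_paths/Operations/ProductController.py | get_parent_num
-- ===== SOURCE A (Python) =====
-- def get_parent_num(st=""):
--     result = ''
--     for i in st:
--         if i.isdigit():
--             result+=i
--         else:
--             result+=','
--
--     result1 = result.split(',')
--     output = []
--
--     for i in result1:
--         if i != '':
--             output.append(i)
--
--     if(len(output) >= 2):
--         return int(output[-2])
--     return None
-- ===== SOURCE B (Python) =====
-- def get_parent_num(st=""):
--     # single reverse scan: find the 2nd digit-run counted from the end, no intermediate lists
--     rcs = st[::-1]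
--     n = len(rcs)
--     k = 0
--     pos = 0
--     while pos < n:
--         if rcs[pos].isdigit():
--             end = pos
--             while end < n and rcs[end].isdigit():
--                 end += 1
--             k += 1
--             if k == 2:
--                 return int(rcs[pos:end][::-1])
--             pos = end
--         else:
--             pos += 1
--     return None
-- ===== Notes on version B (the rewrite author's own statement) =====
-- stated objective: alternative
-- what changed: A substitutes non-digits with commas, splits on commas, filters empty pieces into a list of all digit groups and indexes [-2]; B does a single reverse scan over the string, stopping as soon as the second digit run from the end is complete, and converts just that run.
import Mathlib
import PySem

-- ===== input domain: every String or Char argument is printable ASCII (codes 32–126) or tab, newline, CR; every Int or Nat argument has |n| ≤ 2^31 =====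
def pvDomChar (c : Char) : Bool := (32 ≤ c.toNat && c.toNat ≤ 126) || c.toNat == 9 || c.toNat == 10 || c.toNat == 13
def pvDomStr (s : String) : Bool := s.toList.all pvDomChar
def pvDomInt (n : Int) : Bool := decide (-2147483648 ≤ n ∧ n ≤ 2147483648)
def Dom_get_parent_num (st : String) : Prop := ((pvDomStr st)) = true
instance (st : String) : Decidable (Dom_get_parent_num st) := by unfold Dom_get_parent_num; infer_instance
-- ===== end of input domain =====

-- B replaces A's substitute–split–filter pipeline by a single reverse scan that stops at the
-- second digit run from the end (objective: alternative algorithm, same result).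


-- ===== PORT A =====
def get_parent_num (st : String) : Option Int :=
  let result : List Char :=
    st.toList.foldl (fun acc i => if PySem.Chars.isdigit i then acc ++ [i] else acc ++ [',']) []
  let result1 := PySem.Chars.splitOn result [',']
  let output := result1.foldl (fun acc i => if i ≠ [] then acc ++ [i] else acc) []
  if 2 ≤ output.length then (PySem.List.pyGet? output (-2)).bind PySem.Int.ofChars?
  else none

-- ===== PORT B =====
-- the outer while loop of Source B; its inner index-advancing while over the digit run is the
-- takeWhile/dropWhile of the remaining reversed characters
def gpnScan : List Char → Nat → Option Int
  | [], _ => none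
  | c :: rest, k =>
    if PySem.Chars.isdigit c then
      if k + 1 = 2 then PySem.Int.ofChars? (((c :: rest).takeWhile PySem.Chars.isdigit).reverse)
      else gpnScan ((c :: rest).dropWhile PySem.Chars.isdigit) (k + 1)
    else gpnScan rest k
termination_by l _ => l.length
decreasing_by
  · simp only [List.dropWhile_cons, *, if_pos]
    exact Nat.lt_succ_of_le (List.length_dropWhile_le _ _)
  · simp

def get_parent_num_alt (st : String) : Option Int :=
  gpnScan st.toList.reverse 0

-- ===== PRECONDITION & SPEC =====
def Spec_get_parent_num (st : String) (out : Option Int) : Prop := out = get_parent_num_alt st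
instance (st : String) (out : Option Int) : Decidable (Spec_get_parent_num st out) := by unfold Spec_get_parent_num; infer_instance

-- ===== CLAIM (what is proved, stated in full; the proofs are below) =====
def Claim_equal_get_parent_num : Prop := ∀ (st : String), Dom_get_parent_num st → Spec_get_parent_num st (get_parent_num st)

-- ===== LEMMAS AND PROOFS =====

-- the maximal digit runs of cs, in order (proof-only notion both ports are reduced to)
def pvRuns : List Char → List (List Char)
  | [] => []
  | c :: t =>
    if PySem.Chars.isdigit c then
      (c :: t.takeWhile PySem.Chars.isdigit) :: pvRuns (t.dropWhile PySem.Chars.isdigit)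
    else pvRuns t
termination_by l => l.length
decreasing_by
  · exact Nat.lt_succ_of_le (List.length_dropWhile_le _ _)
  · simp

-- Python str.split(',') (single-char separator), structurally
def pvSplit : List Char → List (List Char)
  | [] => [[]]
  | c :: t => if c = ',' then [] :: pvSplit t else (pvSplit t).modifyHead (c :: ·)

def pvSubst (c : Char) : Char := if PySem.Chars.isdigit c then c else ','

lemma pvSplit_ne_nil (l : List Char) : pvSplit l ≠ [] := by
  cases l with
  | nil => simp [pvSplit]
  | cons c t =>
    simp only [pvSplit]
    split
    · simp
    · exact fun h => absurd (List.modifyHead_eq_nil_iff.mp h) (by cases ht : pvSplit t with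
        | nil => exact absurd ht (pvSplit_ne_nil t)
        | cons a b => simp)

lemma go_spec : ∀ (fuel : Nat) (l cur : List Char) (acc : List (List Char)) (_ : l.length ≤ fuel),
    PySem.Chars.splitOn.go [','] fuel l cur acc
      = acc.reverse ++ (pvSplit l).modifyHead (cur.reverse ++ ·) := by
  intro fuel
  induction fuel with
  | zero =>
    intro l cur acc h
    have : l = [] := List.eq_nil_of_length_eq_zero (Nat.le_zero.mp h)
    subst this
    rw [PySem.Chars.splitOn.go.eq_1]
    simp [pvSplit]
  | succ f ih =>
    intro l cur acc h
    cases l with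
    | nil =>
      rw [PySem.Chars.splitOn.go.eq_2 _ _ _ _ (by omega)]
      simp [pvSplit]
    | cons c rest =>
      rw [PySem.Chars.splitOn.go.eq_3]
      by_cases hc : c = ','
      · subst hc
        rw [if_pos (by simp [List.isPrefixOf])]
        simp only [List.length_cons] at h
        rw [show List.drop [','].length (',' :: rest) = rest by simp]
        rw [ih rest [] _ (by omega)]
        cases ht : pvSplit rest with
        | nil => exact absurd ht (pvSplit_ne_nil rest)
        | cons a b => simp [pvSplit, ht]
      · rw [if_neg (by simp [List.isPrefixOf]; exact fun h => hc h.symm)]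
        simp only [List.length_cons] at h
        rw [ih rest (c :: cur) acc (by omega)]
        simp only [pvSplit, if_neg hc, List.reverse_cons]
        congr 1
        cases ht : pvSplit rest with
        | nil => exact absurd ht (pvSplit_ne_nil rest)
        | cons a b => simp [List.modifyHead]

lemma splitOn_comma (s : List Char) : PySem.Chars.splitOn s [','] = pvSplit s := by
  rw [PySem.Chars.splitOn, go_spec (s.length+1) s [] [] (by omega)]
  cases ht : pvSplit s with
  | nil => exact absurd ht (pvSplit_ne_nil s)
  | cons a b => simp

lemma comma_not_digit : PySem.Chars.isdigit ',' = false := by decide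

-- combined structural lemma: head of pvSplit is the digit prefix, and filtering gives the runs
lemma pvSplit_spec (cs : List Char) :
    pvSplit (cs.map pvSubst)
        = cs.takeWhile PySem.Chars.isdigit :: (pvSplit (cs.map pvSubst)).tail
    ∧ (pvSplit (cs.map pvSubst)).filter (fun p => decide (p ≠ [])) = pvRuns cs := by
  induction cs with
  | nil => simp [pvSplit, pvRuns]
  | cons c t ih =>
    by_cases hd : PySem.Chars.isdigit c
    · have hne : c ≠ ',' := by intro h; rw [h] at hd; simp [comma_not_digit] at hd
      have h1 : pvSplit ((c :: t).map pvSubst)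
          = (c :: t.takeWhile PySem.Chars.isdigit) :: (pvSplit (t.map pvSubst)).tail := by
        simp only [List.map_cons, pvSubst, if_pos hd, pvSplit, if_neg hne]
        rw [ih.1]
        simp [List.modifyHead]
      constructor
      · rw [h1]; simp [hd]
      · rw [h1]
        rw [show pvRuns (c :: t)
            = (c :: t.takeWhile PySem.Chars.isdigit) :: pvRuns (t.dropWhile PySem.Chars.isdigit) by
          rw [pvRuns]; simp [hd]]
        simp only [List.filter_cons, decide_eq_true_eq]
        rw [if_pos (by simp)]
        congr 1
        have h2 := ih.2
        rw [ih.1] at h2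
        simp only [List.filter_cons, decide_eq_true_eq] at h2
        simp only [ne_eq, decide_not]
        simp only [ne_eq, decide_not] at h2
        cases htw : t.takeWhile PySem.Chars.isdigit with
        | nil =>
          rw [htw] at h2
          simp at h2
          rw [h2]
          have : t.dropWhile PySem.Chars.isdigit = t := by
            cases t with
            | nil => rfl
            | cons a s =>
              simp only [List.takeWhile_cons] at htw
              by_cases ha : PySem.Chars.isdigit a
              · rw [if_pos ha] at htw; simp at htw
              · simp [ha]
          rw [this]
        | cons a s =>
          rw [htw] at h2
          rw [if_pos (by simp)] at h2
          cases t with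
          | nil => simp at htw
          | cons b u =>
            simp only [List.takeWhile_cons] at htw
            by_cases hb : PySem.Chars.isdigit b
            · rw [if_pos hb] at htw
              rw [show pvRuns (b :: u)
                  = (b :: u.takeWhile PySem.Chars.isdigit) :: pvRuns (u.dropWhile PySem.Chars.isdigit) by
                rw [pvRuns]; simp [hb]] at h2
              have : (b :: u).dropWhile PySem.Chars.isdigit = u.dropWhile PySem.Chars.isdigit := by
                simp [hb]
              rw [this]
              rw [htw] at h2
              exact (List.cons.injEq _ _ _ _ ▸ h2).2
            · rw [if_neg hb] at htw; simp at htw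
    · have h1 : pvSplit ((c :: t).map pvSubst) = [] :: pvSplit (t.map pvSubst) := by
        simp [List.map_cons, pvSubst, if_neg hd, pvSplit]
      constructor
      · rw [h1]; simp [hd]
      · rw [h1]
        simp only [List.filter_cons]
        rw [if_neg (by simp)]
        rw [ih.2]
        rw [show pvRuns (c :: t) = pvRuns t by rw [pvRuns]; simp [hd]]

lemma pvRuns_cons_digit {c : Char} (t : List Char) (hd : PySem.Chars.isdigit c = true) :
    pvRuns (c :: t)
      = (c :: t.takeWhile PySem.Chars.isdigit) :: pvRuns (t.dropWhile PySem.Chars.isdigit) := by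
  rw [pvRuns]; simp [hd]

lemma pvRuns_cons_nondigit {c : Char} (t : List Char) (hd : PySem.Chars.isdigit c = false) :
    pvRuns (c :: t) = pvRuns t := by
  rw [pvRuns]; simp [hd]

lemma pvTakeAll {p : Char → Bool} {l : List Char} (h : ∀ x ∈ l, p x) : l.takeWhile p = l := by
  induction l with
  | nil => rfl
  | cons a t ih => simp [h a (by simp), ih (fun x hx => h x (by simp [hx]))]

lemma pvDropAll {p : Char → Bool} {l : List Char} (h : ∀ x ∈ l, p x) : l.dropWhile p = [] :=
  List.dropWhile_eq_nil_iff.mpr h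

lemma pvAllOfTakeLen {p : Char → Bool} {l : List Char}
    (h : (l.takeWhile p).length = l.length) : l.all p = true := by
  have h2 : l.takeWhile p = l := (List.takeWhile_sublist (p := p) (l := l)).eq_of_length h
  rw [List.all_eq_true]
  intro x hx
  exact List.mem_takeWhile_imp (h2 ▸ hx)

lemma pvRuns_all_digit (ds : List Char) (h : ds.all PySem.Chars.isdigit) (hne : ds ≠ []) :
    pvRuns ds = [ds] := by
  cases ds with
  | nil => simp at hne
  | cons d t =>
    simp only [List.all_cons, Bool.and_eq_true] at h
    rw [pvRuns_cons_digit t h.1]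
    rw [pvTakeAll (List.all_eq_true.mp h.2), pvDropAll (List.all_eq_true.mp h.2)]
    simp [pvRuns]

-- appending a non-digit char on the right does not change the runs
lemma pvRuns_append_nondigit : ∀ (n : Nat) (zs : List Char), zs.length ≤ n →
    ∀ {c : Char}, PySem.Chars.isdigit c = false → pvRuns (zs ++ [c]) = pvRuns zs := by
  intro n
  induction n with
  | zero =>
    intro zs h c hc
    have : zs = [] := List.eq_nil_of_length_eq_zero (Nat.le_zero.mp h)
    subst this
    simp [pvRuns_cons_nondigit _ hc, pvRuns]
  | succ m ih =>
    intro zs h c hc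
    cases zs with
    | nil => simp [pvRuns_cons_nondigit _ hc, pvRuns]
    | cons z w =>
      simp only [List.length_cons] at h
      by_cases hz : PySem.Chars.isdigit z
      · rw [List.cons_append, pvRuns_cons_digit _ hz, pvRuns_cons_digit _ hz]
        by_cases hall : w.all PySem.Chars.isdigit
        · have hwall := List.all_eq_true.mp hall
          have htw : (w ++ [c]).takeWhile PySem.Chars.isdigit = w := by
            rw [List.takeWhile_append, pvTakeAll hwall]
            simp [hc]
          have hdw : (w ++ [c]).dropWhile PySem.Chars.isdigit = [c] := by
            rw [List.dropWhile_append, pvDropAll hwall]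
            simp [hc]
          rw [htw, hdw, pvTakeAll hwall, pvDropAll hwall]
          simp [pvRuns_cons_nondigit _ hc, pvRuns]
        · have hlen : (w.takeWhile PySem.Chars.isdigit).length ≠ w.length := by
            intro hl
            exact hall (pvAllOfTakeLen hl)
          have htw : (w ++ [c]).takeWhile PySem.Chars.isdigit = w.takeWhile PySem.Chars.isdigit := by
            rw [List.takeWhile_append, if_neg hlen]
          have hdw : (w ++ [c]).dropWhile PySem.Chars.isdigit
              = w.dropWhile PySem.Chars.isdigit ++ [c] := by
            rw [List.dropWhile_append]
            rw [if_neg (by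
              rw [List.isEmpty_iff, List.dropWhile_eq_nil_iff]
              intro hall'
              exact hall (List.all_eq_true.mpr hall'))]
          rw [htw, hdw, ih _ (by
            have := List.length_dropWhile_le PySem.Chars.isdigit w
            omega) hc]
      · rw [List.cons_append, pvRuns_cons_nondigit _ (by simpa using hz),
          pvRuns_cons_nondigit _ (by simpa using hz)]
        exact ih _ (by omega) hc

-- appending an all-digit block after a list not ending in a digit adds one run
lemma pvRuns_append_digit : ∀ (n : Nat) (zs : List Char), zs.length ≤ n →
    ∀ {ds : List Char}, ds ≠ [] → (∀ x ∈ ds, PySem.Chars.isdigit x) →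
    (∀ c, zs.getLast? = some c → PySem.Chars.isdigit c = false) →
    pvRuns (zs ++ ds) = pvRuns zs ++ [ds] := by
  intro n
  induction n with
  | zero =>
    intro zs h ds hne hall _
    have : zs = [] := List.eq_nil_of_length_eq_zero (Nat.le_zero.mp h)
    subst this
    simp [pvRuns_all_digit ds (List.all_eq_true.mpr hall) hne, pvRuns]
  | succ m ih =>
    intro zs h ds hne hall hlast
    cases zs with
    | nil => simp [pvRuns_all_digit ds (List.all_eq_true.mpr hall) hne, pvRuns]
    | cons z w =>
      simp only [List.length_cons] at h
      by_cases hz : PySem.Chars.isdigit z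
      · -- w must be nonempty (last of z::w is nondigit) and not all digits
        cases w with
        | nil =>
          exact absurd (hlast z (by simp)) (by simp [hz])
        | cons b u =>
          have hwall : ¬ (b :: u).all PySem.Chars.isdigit = true := by
            intro hba
            have hl := hlast ((b :: u).getLast (by simp)) (by
              rw [List.getLast?_cons_cons]
              exact List.getLast?_eq_some_getLast _)
            have := List.all_eq_true.mp hba _ (List.getLast_mem (l := b :: u) (by simp))
            rw [hl] at this
            exact absurd this (by simp)
          have hlen : ((b :: u).takeWhile PySem.Chars.isdigit).length ≠ (b :: u).length := by
            intro hl
            exact hwall (pvAllOfTakeLen hl)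
          have hdwne : (b :: u).dropWhile PySem.Chars.isdigit ≠ [] := by
            intro hnil
            exact hwall (List.all_eq_true.mpr (List.dropWhile_eq_nil_iff.mp hnil))
          obtain ⟨t, ht⟩ := List.dropWhile_suffix (l := b :: u) PySem.Chars.isdigit
          rw [List.cons_append, pvRuns_cons_digit _ hz, pvRuns_cons_digit _ hz]
          have htw : ((b :: u) ++ ds).takeWhile PySem.Chars.isdigit
              = (b :: u).takeWhile PySem.Chars.isdigit := by
            rw [List.takeWhile_append, if_neg hlen]
          have hdw : ((b :: u) ++ ds).dropWhile PySem.Chars.isdigit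
              = (b :: u).dropWhile PySem.Chars.isdigit ++ ds := by
            rw [List.dropWhile_append, if_neg (by rw [List.isEmpty_iff]; exact hdwne)]
          rw [htw, hdw]
          rw [ih _ (by have h1 := List.length_dropWhile_le PySem.Chars.isdigit (b :: u); omega)
            hne hall (by
              intro c hcl
              apply hlast c
              rw [List.getLast?_cons_cons, ← ht, List.getLast?_append, hcl]
              rfl)]
          simp
      · rw [List.cons_append, pvRuns_cons_nondigit _ (by simpa using hz),
          pvRuns_cons_nondigit _ (by simpa using hz)]
        apply ih _ (by omega) hne hall
        intro c hcl
        apply hlast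
        cases w with
        | nil => simp at hcl
        | cons b u => rw [List.getLast?_cons_cons]; exact hcl

lemma pvRuns_reverse : ∀ (n : Nat) (cs : List Char), cs.length ≤ n →
    pvRuns cs.reverse = ((pvRuns cs).map List.reverse).reverse := by
  intro n
  induction n with
  | zero =>
    intro cs h
    have : cs = [] := List.eq_nil_of_length_eq_zero (Nat.le_zero.mp h)
    subst this
    simp [pvRuns]
  | succ m ih =>
    intro cs h
    cases cs with
    | nil => simp [pvRuns]
    | cons c t =>
      simp only [List.length_cons] at h
      by_cases hd : PySem.Chars.isdigit c
      · rw [pvRuns_cons_digit _ hd]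
        have hsplit : (c :: t).reverse
            = (t.dropWhile PySem.Chars.isdigit).reverse
              ++ (c :: t.takeWhile PySem.Chars.isdigit).reverse := by
          rw [← List.reverse_append, List.cons_append, List.takeWhile_append_dropWhile]
        rw [hsplit]
        rw [pvRuns_append_digit ((t.dropWhile PySem.Chars.isdigit).reverse.length) _ le_rfl
          (by simp) (by
            intro x hx
            simp only [List.reverse_cons, List.mem_append, List.mem_reverse, List.mem_singleton] at hx
            rcases hx with hx | hx
            · exact List.mem_takeWhile_imp hx
            · subst hx; exact hd)
          (by
            intro a ha
            rw [List.getLast?_reverse] at ha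
            cases hdw : t.dropWhile PySem.Chars.isdigit with
            | nil => rw [hdw] at ha; simp at ha
            | cons e v =>
              rw [hdw] at ha
              simp only [List.head?_cons, Option.some.injEq] at ha
              subst ha
              have hne' : t.dropWhile PySem.Chars.isdigit ≠ [] := by rw [hdw]; simp
              have := List.head_dropWhile_not PySem.Chars.isdigit hne'
              simpa [List.head_eq_iff_head?_eq_some, hdw] using this)]
        rw [ih (t.dropWhile PySem.Chars.isdigit) (by
          have := List.length_dropWhile_le PySem.Chars.isdigit t; omega)]
        simp
      · rw [pvRuns_cons_nondigit _ (by simpa using hd)]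
        rw [List.reverse_cons, pvRuns_append_nondigit (t.reverse.length) _ (by simp) (by simpa using hd)]
        rw [ih t (by omega)]

lemma gpnScan_one : ∀ (n : Nat) (xs : List Char), xs.length ≤ n →
    gpnScan xs 1 = match pvRuns xs with
      | [] => none
      | r :: _ => PySem.Int.ofChars? r.reverse := by
  intro n
  induction n with
  | zero =>
    intro xs h
    have : xs = [] := List.eq_nil_of_length_eq_zero (Nat.le_zero.mp h)
    subst this
    simp [gpnScan, pvRuns]
  | succ m ih =>
    intro xs h
    cases xs with
    | nil => simp [gpnScan, pvRuns]
    | cons c rest =>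
      simp only [List.length_cons] at h
      by_cases hd : PySem.Chars.isdigit c
      · rw [gpnScan, if_pos hd, if_pos rfl, pvRuns_cons_digit _ hd]
        simp [hd]
      · rw [gpnScan, if_neg hd, pvRuns_cons_nondigit _ (by simpa using hd)]
        exact ih rest (by omega)

lemma gpnScan_zero : ∀ (n : Nat) (xs : List Char), xs.length ≤ n →
    gpnScan xs 0 = match pvRuns xs with
      | _ :: r :: _ => PySem.Int.ofChars? r.reverse
      | _ => none := by
  intro n
  induction n with
  | zero =>
    intro xs h
    have : xs = [] := List.eq_nil_of_length_eq_zero (Nat.le_zero.mp h)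
    subst this
    simp [gpnScan, pvRuns]
  | succ m ih =>
    intro xs h
    cases xs with
    | nil => simp [gpnScan, pvRuns]
    | cons c rest =>
      simp only [List.length_cons] at h
      by_cases hd : PySem.Chars.isdigit c
      · rw [gpnScan, if_pos hd, if_neg (by omega), pvRuns_cons_digit _ hd]
        have hdw : (c :: rest).dropWhile PySem.Chars.isdigit
            = rest.dropWhile PySem.Chars.isdigit := by simp [hd]
        rw [hdw, gpnScan_one (rest.dropWhile PySem.Chars.isdigit).length _ le_rfl]
        cases pvRuns (rest.dropWhile PySem.Chars.isdigit) <;> rfl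
      · rw [gpnScan, if_neg hd, pvRuns_cons_nondigit _ (by simpa using hd)]
        exact ih rest (by omega)

-- ===== VERDICT (by name: the statement is the Claim_ definition above) =====
theorem get_parent_num_spec : Claim_equal_get_parent_num := by
  unfold Claim_equal_get_parent_num
  intro st _
  unfold Spec_get_parent_num get_parent_num get_parent_num_alt
  simp only []
  -- A's first loop builds the substituted character list
  have hres : st.toList.foldl
        (fun acc i => if PySem.Chars.isdigit i then acc ++ [i] else acc ++ [',']) []
      = st.toList.map pvSubst := by
    rw [show (fun (acc : List Char) i => if PySem.Chars.isdigit i then acc ++ [i] else acc ++ [','])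
        = fun acc i => acc ++ [pvSubst i] by
      funext acc i; unfold pvSubst; split <;> rfl]
    rw [PySem.List.foldl_append_singleton_eq_map]
    rfl
  rw [hres, splitOn_comma]
  -- A's second loop filters the empty pieces
  rw [PySem.List.foldl_append_ite_eq_filter]
  rw [List.nil_append, (pvSplit_spec st.toList).2]
  -- B's scan over the reversed characters finds the second run from the end
  rw [gpnScan_zero st.toList.reverse.length _ le_rfl,
    pvRuns_reverse st.toList.length _ le_rfl]
  -- compare, decomposing the runs from the back
  rcases hr : pvRuns st.toList with _ | ⟨a, _ | ⟨b, rest⟩⟩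
  · simp
  · simp
  · obtain ⟨ys, p, q, hdecomp⟩ : ∃ ys p q, a :: b :: rest = ys ++ [p, q] := by
      rcases hrev : (a :: b :: rest).reverse with _ | ⟨x, _ | ⟨y, zs⟩⟩
      · exact absurd (congrArg List.length hrev) (by simp)
      · exact absurd (congrArg List.length hrev) (by simp)
      · exact ⟨zs.reverse, y, x, by
          rw [← List.reverse_reverse (a :: b :: rest), hrev]; simp⟩
    rw [hdecomp]
    rw [if_pos (by simp)]
    simp [PySem.List.pyGet?, PySem.List.pyIdx?]
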